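-- pv_equiv track=rewrite | github.com/kwkwan00/dark-factory | src/dark_factory/memory/repository.py | _detect_label
-- ===== SOURCE A (Python) =====
-- def _detect_label(node_id: str) -> str | None:
--     """Detect the label of a memory node from its ID prefix."""
--     for prefix, label in [
--         ("pattern-", "Pattern"),
--         ("mistake-", "Mistake"),
--         ("solution-", "Solution"),
--         ("strategy-", "Strategy"),
--     ]:
--         if node_id.startswith(prefix):
--             return label
--     return None
-- ===== SOURCE B (Python) =====
-- _LABELS = {
--     "pattern": "Pattern",
--     "mistake": "Mistake",
--     "solution": "Solution",
--     "strategy": "Strategy",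
-- }
--
--
-- def _detect_label(node_id: str) -> str | None:
--     """Detect the label of a memory node from its ID prefix."""
--     idx = node_id.find("-")
--     if idx == -1:
--         return None
--     return _LABELS.get(node_id[:idx])
-- ===== Notes on version B (the rewrite author's own statement) =====
-- stated objective: idiomatic
-- what changed: Replaces the linear scan of startswith tests by extracting the part of the id before its first hyphen and doing one dict lookup (None when there is no hyphen or the key is unknown).
import Mathlib
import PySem

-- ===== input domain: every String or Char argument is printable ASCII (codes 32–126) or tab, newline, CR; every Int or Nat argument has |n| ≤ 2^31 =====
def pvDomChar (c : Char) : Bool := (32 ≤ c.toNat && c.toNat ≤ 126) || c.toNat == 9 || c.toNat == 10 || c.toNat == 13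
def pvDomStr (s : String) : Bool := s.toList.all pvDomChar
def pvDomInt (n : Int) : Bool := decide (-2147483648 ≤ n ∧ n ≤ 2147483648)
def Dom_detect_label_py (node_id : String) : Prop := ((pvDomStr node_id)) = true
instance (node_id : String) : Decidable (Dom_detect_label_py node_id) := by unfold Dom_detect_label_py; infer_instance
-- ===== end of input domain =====

-- B replaces A's scan of startswith tests by key-before-first-hyphen extraction plus one dict lookup (idiomatic; same behaviour).

-- ===== PORT A =====
def detect_label_py_loop (node_id : String) : List (String × String) → Option String
  | [] => none
  | (pre, label) :: rest =>
    if PySem.Str.startswith node_id pre then some label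
    else detect_label_py_loop node_id rest

def detect_label_py (node_id : String) : Option String :=
  detect_label_py_loop node_id
    [("pattern-", "Pattern"), ("mistake-", "Mistake"),
     ("solution-", "Solution"), ("strategy-", "Strategy")]

-- ===== PORT B =====
def detect_label_py_labels : PySem.Dict String String :=
  PySem.Dict.ofList
    [("pattern", "Pattern"), ("mistake", "Mistake"),
     ("solution", "Solution"), ("strategy", "Strategy")]

def detect_label_py_alt (node_id : String) : Option String :=
  let idx := PySem.Str.find node_id "-"
  if idx = -1 then none
  else PySem.Dict.get? detect_label_py_labels (PySem.Str.slice node_id none (some idx))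

-- ===== PRECONDITION & SPEC =====
def Spec_detect_label_py (node_id : String) (out : Option String) : Prop := out = detect_label_py_alt node_id
instance (node_id : String) (out : Option String) : Decidable (Spec_detect_label_py node_id out) := by unfold Spec_detect_label_py; infer_instance

-- ===== CLAIM (what is proved, stated in full; the proofs are below) =====
def Claim_equal_detect_label_py : Prop := ∀ (node_id : String), Dom_detect_label_py node_id → Spec_detect_label_py node_id (detect_label_py node_id)

-- ===== LEMMAS AND PROOFS =====

-- ['-'] is a prefix of l.drop j  ↔  position j of l holds '-'
theorem dash_prefix_drop_iff (l : List Char) (j : Nat) :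
    (['-'] <+: l.drop j) ↔ l[j]? = some '-' := by
  constructor
  · rintro ⟨t, ht⟩
    have hd : l.drop j = '-' :: t := ht.symm
    have h1 : (l.drop j)[0]? = some '-' := by simp [hd]
    simpa [List.getElem?_drop] using h1
  · intro h
    have hj : j < l.length := by
      by_contra hc
      simp [List.getElem?_eq_none (by omega : l.length ≤ j)] at h
    have hv : l[j] = '-' := by
      rw [List.getElem?_eq_getElem hj] at h
      simpa using h
    refine ⟨(l.drop j).tail, ?_⟩
    have hd : l.drop j = '-' :: (l.drop j).tail := by
      rw [List.drop_eq_getElem_cons hj]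
      simp [hv]
    conv_rhs => rw [hd]
    simp
-- For a key without '-': (key ++ "-") is a prefix of l  ↔  find l "-" ≥ 0 and the part before the first '-' is key.
theorem key_dash_prefix_iff (key : List Char) (hk : '-' ∉ key) (l : List Char) :
    ((key ++ ['-']) <+: l) ↔
      (0 ≤ PySem.Chars.find l ['-'] ∧ l.take (PySem.Chars.find l ['-']).toNat = key) := by
  constructor
  · rintro ⟨t, ht⟩
    subst ht
    have hdash : ['-'] <+: (key ++ ['-'] ++ t).drop key.length := by
      rw [List.append_assoc, List.drop_left]
      exact ⟨t, rfl⟩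
    have hpos : 0 ≤ PySem.Chars.find (key ++ ['-'] ++ t) ['-'] := by
      rw [PySem.Chars.find_nonneg_iff]
      exact (List.IsPrefix.isInfix hdash).trans (List.drop_suffix _ _).isInfix
    have hspec := PySem.Chars.find_spec (s := key ++ ['-'] ++ t) (sub := ['-']) hpos
    have hle : (PySem.Chars.find (key ++ ['-'] ++ t) ['-']).toNat ≤ key.length := by
      by_contra hgt
      exact hspec.2 key.length (Nat.not_le.mp hgt) hdash
    have hnotlt : ¬ (PySem.Chars.find (key ++ ['-'] ++ t) ['-']).toNat < key.length := by
      intro hlt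
      have hp := hspec.1
      rw [dash_prefix_drop_iff] at hp
      rw [List.getElem?_append_left (by rw [List.length_append]; omega),
          List.getElem?_append_left hlt] at hp
      exact hk (List.mem_of_getElem? hp)
    have heq : (PySem.Chars.find (key ++ ['-'] ++ t) ['-']).toNat = key.length := by omega
    refine ⟨hpos, ?_⟩
    rw [heq, List.append_assoc, List.take_left]
  · rintro ⟨hpos, htake⟩
    have hspec := PySem.Chars.find_spec (s := l) (sub := ['-']) hpos
    obtain ⟨t, ht⟩ := hspec.1
    refine ⟨t, ?_⟩
    conv_rhs => rw [← List.take_append_drop (PySem.Chars.find l ['-']).toNat l]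
    rw [htake, ← ht, List.append_assoc]

-- if find = -1, no (key ++ "-") is a prefix
theorem no_prefix_of_find_neg (key : List Char) (l : List Char)
    (h : PySem.Chars.find l ['-'] = -1) : ¬ ((key ++ ['-']) <+: l) := by
  intro hp
  rw [PySem.Chars.find_eq_neg_one_iff] at h
  exact h (((List.suffix_append key ['-']).isInfix).trans hp.isInfix)

theorem detect_label_py_spec : Claim_equal_detect_label_py := by
  intro node_id _
  unfold Spec_detect_label_py detect_label_py detect_label_py_alt
  simp only [detect_label_py_loop, PySem.Str.startswith_eq, PySem.Str.find_eq,
    show ("-" : String).toList = ['-'] from rfl,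
    show ("pattern-" : String).toList = "pattern".toList ++ ['-'] from rfl,
    show ("mistake-" : String).toList = "mistake".toList ++ ['-'] from rfl,
    show ("solution-" : String).toList = "solution".toList ++ ['-'] from rfl,
    show ("strategy-" : String).toList = "strategy".toList ++ ['-'] from rfl]
  set l := node_id.toList with hl
  by_cases hneg : PySem.Chars.find l ['-'] = -1
  · have hsw : ∀ key : List Char, ¬ (PySem.Chars.startswith l (key ++ ['-']) = true) := by
      intro key h
      exact no_prefix_of_find_neg key l hneg ((PySem.Chars.startswith_iff _ _).mp h)
    rw [if_pos hneg, if_neg (hsw _), if_neg (hsw _), if_neg (hsw _), if_neg (hsw _)]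
  · have hpos : 0 ≤ PySem.Chars.find l ['-'] := by
      have := PySem.Chars.neg_one_le_find (s := l) (sub := ['-'])
      omega
    rw [if_neg hneg]
    have hslice : (PySem.Str.slice node_id none (some (PySem.Chars.find l ['-']))).toList
        = l.take (PySem.Chars.find l ['-']).toNat := by
      rw [PySem.Str.toList_slice, PySem.Chars.slice_eq_listSlice, ← hl,
        PySem.List.slice_to _ hpos]
    set ks := PySem.Str.slice node_id none (some (PySem.Chars.find l ['-'])) with hks
    have hkey : ∀ key : List Char, '-' ∉ key →
        (PySem.Chars.startswith l (key ++ ['-']) = true ↔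
          l.take (PySem.Chars.find l ['-']).toNat = key) := by
      intro key hnk
      rw [PySem.Chars.startswith_iff, key_dash_prefix_iff key hnk l]
      exact ⟨fun h => h.2, fun h => ⟨hpos, h⟩⟩
    have hstr : ∀ s : String, l.take (PySem.Chars.find l ['-']).toNat = s.toList → ks = s := by
      intro s hs
      have : ks.toList = s.toList := by rw [hslice, hs]
      exact String.ext (by simpa [String.toList] using this)
    by_cases c1 : l.take (PySem.Chars.find l ['-']).toNat = "pattern".toList
    · rw [if_pos ((hkey "pattern".toList (by decide)).mpr c1), hstr _ c1]; decide
    · rw [if_neg (fun h => c1 ((hkey "pattern".toList (by decide)).mp h))]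
      by_cases c2 : l.take (PySem.Chars.find l ['-']).toNat = "mistake".toList
      · rw [if_pos ((hkey "mistake".toList (by decide)).mpr c2), hstr _ c2]; decide
      · rw [if_neg (fun h => c2 ((hkey "mistake".toList (by decide)).mp h))]
        by_cases c3 : l.take (PySem.Chars.find l ['-']).toNat = "solution".toList
        · rw [if_pos ((hkey "solution".toList (by decide)).mpr c3), hstr _ c3]; decide
        · rw [if_neg (fun h => c3 ((hkey "solution".toList (by decide)).mp h))]
          by_cases c4 : l.take (PySem.Chars.find l ['-']).toNat = "strategy".toList
          · rw [if_pos ((hkey "strategy".toList (by decide)).mpr c4), hstr _ c4]; decide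
          · rw [if_neg (fun h => c4 ((hkey "strategy".toList (by decide)).mp h))]
            have hne : ∀ s : String, l.take (PySem.Chars.find l ['-']).toNat ≠ s.toList → ¬ (s = ks) := by
              intro s hs h
              exact hs (by rw [← hslice, h])
            have hlab : detect_label_py_labels = PySem.Dict.mk
                [("pattern", "Pattern"), ("mistake", "Mistake"),
                 ("solution", "Solution"), ("strategy", "Strategy")] := by rfl
            rw [hlab]
            simp [beq_iff_eq, hne _ c1, hne _ c2, hne _ c3, hne _ c4,
              PySem.Dict.get?]
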